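-- pv_equiv track=rewrite | github.com/cryptopoly/ChaosEngineAI | backend_service/app.py | _image_task_support_from_metadata
-- ===== SOURCE A (Python) =====
-- def _image_task_support_from_metadata(pipeline_tag: str | None, tags: list[str]) -> list[str]:
--     pipeline = str(pipeline_tag or "").lower()
--     lowered_tags = {str(tag).lower() for tag in tags}
--     tasks: list[str] = []
--     if (
--         pipeline == "text-to-image"
--         or "text-to-image" in lowered_tags
--         or "image-generation" in lowered_tags
--     ):
--         tasks.append("txt2img")
--     if (
--         pipeline == "image-to-image"
--         or "image-to-image" in lowered_tags
--         or "image-edit" in lowered_tags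
--         or "editing" in lowered_tags
--     ):
--         tasks.append("img2img")
--     if pipeline == "inpainting" or "inpainting" in lowered_tags or "inpaint" in lowered_tags:
--         tasks.append("inpaint")
--     return tasks or ["txt2img"]
-- ===== SOURCE B (Python) =====
-- _PIPELINE_TASK = {
--     "text-to-image": "txt2img",
--     "image-to-image": "img2img",
--     "inpainting": "inpaint",
-- }
--
-- _TAG_TASK = {
--     "text-to-image": "txt2img",
--     "image-generation": "txt2img",
--     "image-to-image": "img2img",
--     "image-edit": "img2img",
--     "editing": "img2img",
--     "inpainting": "inpaint",
--     "inpaint": "inpaint",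
-- }
--
--
-- def _image_task_support_from_metadata(pipeline_tag, tags):
--     # Inverted index: scan the inputs once, mapping each trigger keyword to the
--     # task it fires, then emit the fired tasks in canonical order.
--     fired = set()
--     task = _PIPELINE_TASK.get(str(pipeline_tag or "").lower())
--     if task is not None:
--         fired.add(task)
--     for tag in tags:
--         task = _TAG_TASK.get(str(tag).lower())
--         if task is not None:
--             fired.add(task)
--     tasks = [label for label in ("txt2img", "img2img", "inpaint") if label in fired]
--     return tasks or ["txt2img"]
-- ===== Notes on version B (the rewrite author's own statement) =====
-- stated objective: alternative
-- what changed: Inverts the control flow: instead of A's three per-task conditionals testing membership in a lowered-tag set, B builds trigger-to-task dictionaries and makes one pass over the pipeline string and the tags, accumulating the set of fired tasks, then emits them in canonical order.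
import Mathlib
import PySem

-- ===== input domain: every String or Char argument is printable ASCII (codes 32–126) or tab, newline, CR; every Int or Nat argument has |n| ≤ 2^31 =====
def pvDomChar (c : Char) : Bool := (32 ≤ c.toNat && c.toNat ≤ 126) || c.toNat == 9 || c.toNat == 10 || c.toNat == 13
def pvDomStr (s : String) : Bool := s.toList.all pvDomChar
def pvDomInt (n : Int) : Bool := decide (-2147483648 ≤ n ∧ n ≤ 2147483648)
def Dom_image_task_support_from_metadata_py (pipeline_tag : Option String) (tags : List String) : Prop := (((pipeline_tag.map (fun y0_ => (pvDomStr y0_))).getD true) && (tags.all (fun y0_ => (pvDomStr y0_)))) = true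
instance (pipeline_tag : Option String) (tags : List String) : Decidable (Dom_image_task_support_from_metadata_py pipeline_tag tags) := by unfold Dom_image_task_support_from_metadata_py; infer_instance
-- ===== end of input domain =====

-- B inverts A's per-task membership tests into one pass over the inputs through a trigger→task index (objective: alternative, same results).

-- ===== PORT A =====
-- Literal port of A: the three unrolled conditionals over pipeline and lowered tag set.
def image_task_support_from_metadata_py (pipeline_tag : Option String) (tags : List String) : List String :=
  let pipeline := PySem.Str.lower (pipeline_tag.getD "")
  let lowered_tags : PySem.Set String := PySem.Set.ofList (tags.map (fun tag => PySem.Str.lower tag))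
  let tasks : List String := []
  let tasks := if pipeline == "text-to-image" || PySem.Set.contains lowered_tags "text-to-image" || PySem.Set.contains lowered_tags "image-generation" then tasks ++ ["txt2img"] else tasks
  let tasks := if pipeline == "image-to-image" || PySem.Set.contains lowered_tags "image-to-image" || PySem.Set.contains lowered_tags "image-edit" || PySem.Set.contains lowered_tags "editing" then tasks ++ ["img2img"] else tasks
  let tasks := if pipeline == "inpainting" || PySem.Set.contains lowered_tags "inpainting" || PySem.Set.contains lowered_tags "inpaint" then tasks ++ ["inpaint"] else tasks
  if tasks.isEmpty then ["txt2img"] else tasks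

-- ===== PORT B =====
-- Port of B: inverted trigger→task dictionaries, one pass over pipeline and tags accumulating fired tasks.
def pvPipeTask : PySem.Dict String String :=
  PySem.Dict.mk [("text-to-image", "txt2img"), ("image-to-image", "img2img"), ("inpainting", "inpaint")]

def pvTagTask : PySem.Dict String String :=
  PySem.Dict.mk [("text-to-image", "txt2img"), ("image-generation", "txt2img"),
                 ("image-to-image", "img2img"), ("image-edit", "img2img"), ("editing", "img2img"),
                 ("inpainting", "inpaint"), ("inpaint", "inpaint")]

-- the loop body of B's for-loop (named so the lemmas can speak about it)
def pvStep (s : PySem.Set String) (tag : String) : PySem.Set String :=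
  match PySem.Dict.get? pvTagTask (PySem.Str.lower tag) with
  | some t => PySem.Set.add s t
  | none => s

def image_task_support_from_metadata_py_alt (pipeline_tag : Option String) (tags : List String) : List String :=
  let fired0 : PySem.Set String :=
    match PySem.Dict.get? pvPipeTask (PySem.Str.lower (pipeline_tag.getD "")) with
    | some t => PySem.Set.add PySem.Set.empty t
    | none => PySem.Set.empty
  let fired := tags.foldl pvStep fired0
  let tasks := ["txt2img", "img2img", "inpaint"].filter (fun label => PySem.Set.contains fired label)
  if tasks.isEmpty then ["txt2img"] else tasks

-- ===== PRECONDITION & SPEC =====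
def Spec_image_task_support_from_metadata_py (pipeline_tag : Option String) (tags : List String) (out : List String) : Prop := out = image_task_support_from_metadata_py_alt pipeline_tag tags
instance (pipeline_tag : Option String) (tags : List String) (out : List String) : Decidable (Spec_image_task_support_from_metadata_py pipeline_tag tags out) := by unfold Spec_image_task_support_from_metadata_py; infer_instance

-- ===== CLAIM (what is proved, stated in full; the proofs are below) =====
def Claim_equal_image_task_support_from_metadata_py : Prop := ∀ (pipeline_tag : Option String) (tags : List String), Dom_image_task_support_from_metadata_py pipeline_tag tags → Spec_image_task_support_from_metadata_py pipeline_tag tags (image_task_support_from_metadata_py pipeline_tag tags)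

-- ===== LEMMAS AND PROOFS =====

theorem pvEmptyGet (q : String) : (PySem.Dict.mk ([] : List (String × String))).get? q = none :=
  PySem.Dict.get?_empty q

-- characterisation of the pipeline index
theorem pvPipeGet (q lab : String) : pvPipeTask.get? q = some lab ↔
    ((q = "text-to-image" ∧ lab = "txt2img") ∨ (q = "image-to-image" ∧ lab = "img2img") ∨ (q = "inpainting" ∧ lab = "inpaint")) := by
  simp only [pvPipeTask, PySem.Dict.get?_mk_cons]
  split_ifs with h1 h2 h3 <;> simp [pvEmptyGet] <;> aesop

-- characterisation of the tag index
theorem pvTagGet (q lab : String) : pvTagTask.get? q = some lab ↔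
    (((q = "text-to-image" ∨ q = "image-generation") ∧ lab = "txt2img") ∨
     ((q = "image-to-image" ∨ q = "image-edit" ∨ q = "editing") ∧ lab = "img2img") ∨
     ((q = "inpainting" ∨ q = "inpaint") ∧ lab = "inpaint")) := by
  simp only [pvTagTask, PySem.Dict.get?_mk_cons]
  split_ifs with h1 h2 h3 h4 h5 h6 h7 <;> simp [pvEmptyGet] <;> aesop

-- membership in the folded fired set
theorem pvMemFold (tags : List String) (s0 : PySem.Set String) (lab : String) :
    lab ∈ tags.foldl pvStep s0 ↔
      lab ∈ s0 ∨ ∃ t ∈ tags, pvTagTask.get? (PySem.Str.lower t) = some lab := by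
  induction tags generalizing s0 with
  | nil => simp
  | cons x xs ih =>
    simp only [List.foldl_cons, ih]
    have hstep : lab ∈ pvStep s0 x ↔ lab ∈ s0 ∨ pvTagTask.get? (PySem.Str.lower x) = some lab := by
      unfold pvStep
      cases h : pvTagTask.get? (PySem.Str.lower x) with
      | none => simp
      | some t => simp [PySem.Set.mem_add]; tauto
    rw [hstep]
    simp only [List.mem_cons]
    constructor
    · rintro (⟨h | h⟩ | ⟨t, ht, hg⟩)
      · exact Or.inl h
      · exact Or.inr ⟨x, Or.inl rfl, h⟩
      · exact Or.inr ⟨t, Or.inr ht, hg⟩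
    · rintro (h | ⟨t, (rfl | ht), hg⟩)
      · exact Or.inl (Or.inl h)
      · exact Or.inl (Or.inr hg)
      · exact Or.inr ⟨t, ht, hg⟩

-- membership in B's fired set, for a fixed pipeline string p
theorem pvMemFired (p : String) (tags : List String) (lab : String) :
    lab ∈ tags.foldl pvStep
        (match pvPipeTask.get? p with
         | some t => PySem.Set.add PySem.Set.empty t
         | none => PySem.Set.empty) ↔
      pvPipeTask.get? p = some lab ∨ ∃ t ∈ tags, pvTagTask.get? (PySem.Str.lower t) = some lab := by
  rw [pvMemFold]
  cases h : pvPipeTask.get? p with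
  | none => simp [PySem.Set.empty]
  | some t => simp [PySem.Set.empty, eq_comm]

-- the three per-task condition equalities (A's unrolled test = B's fired-set membership)
theorem pvCondTxt (p : String) (tags : List String) :
    PySem.Set.contains (tags.foldl pvStep
        (match pvPipeTask.get? p with
         | some t => PySem.Set.add PySem.Set.empty t
         | none => PySem.Set.empty)) "txt2img" =
      (p == "text-to-image" || PySem.Set.contains (PySem.Set.ofList (tags.map (fun tag => PySem.Str.lower tag))) "text-to-image" || PySem.Set.contains (PySem.Set.ofList (tags.map (fun tag => PySem.Str.lower tag))) "image-generation") := by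
  rw [Bool.eq_iff_iff, PySem.Set.contains_iff, pvMemFired]
  simp [pvPipeGet, pvTagGet, beq_iff_eq, and_or_left, exists_or, or_assoc]

theorem pvCondImg (p : String) (tags : List String) :
    PySem.Set.contains (tags.foldl pvStep
        (match pvPipeTask.get? p with
         | some t => PySem.Set.add PySem.Set.empty t
         | none => PySem.Set.empty)) "img2img" =
      (p == "image-to-image" || PySem.Set.contains (PySem.Set.ofList (tags.map (fun tag => PySem.Str.lower tag))) "image-to-image" || PySem.Set.contains (PySem.Set.ofList (tags.map (fun tag => PySem.Str.lower tag))) "image-edit" || PySem.Set.contains (PySem.Set.ofList (tags.map (fun tag => PySem.Str.lower tag))) "editing") := by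
  rw [Bool.eq_iff_iff, PySem.Set.contains_iff, pvMemFired]
  simp [pvPipeGet, pvTagGet, beq_iff_eq, and_or_left, exists_or, or_assoc]

theorem pvCondInp (p : String) (tags : List String) :
    PySem.Set.contains (tags.foldl pvStep
        (match pvPipeTask.get? p with
         | some t => PySem.Set.add PySem.Set.empty t
         | none => PySem.Set.empty)) "inpaint" =
      (p == "inpainting" || PySem.Set.contains (PySem.Set.ofList (tags.map (fun tag => PySem.Str.lower tag))) "inpainting" || PySem.Set.contains (PySem.Set.ofList (tags.map (fun tag => PySem.Str.lower tag))) "inpaint") := by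
  rw [Bool.eq_iff_iff, PySem.Set.contains_iff, pvMemFired]
  simp [pvPipeGet, pvTagGet, beq_iff_eq, and_or_left, exists_or, or_assoc]

-- ===== VERDICT (by name: the statement is the Claim_ definition above) =====
theorem image_task_support_from_metadata_py_spec : Claim_equal_image_task_support_from_metadata_py := by
  intro pipeline_tag tags _
  unfold Spec_image_task_support_from_metadata_py
  unfold image_task_support_from_metadata_py image_task_support_from_metadata_py_alt
  generalize hp : PySem.Str.lower (pipeline_tag.getD "") = p
  simp only [List.filter, pvCondTxt, pvCondImg, pvCondInp]
  cases hc1 : (p == "text-to-image" || PySem.Set.contains (PySem.Set.ofList (tags.map (fun tag => PySem.Str.lower tag))) "text-to-image" || PySem.Set.contains (PySem.Set.ofList (tags.map (fun tag => PySem.Str.lower tag))) "image-generation") <;>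
  cases hc2 : (p == "image-to-image" || PySem.Set.contains (PySem.Set.ofList (tags.map (fun tag => PySem.Str.lower tag))) "image-to-image" || PySem.Set.contains (PySem.Set.ofList (tags.map (fun tag => PySem.Str.lower tag))) "image-edit" || PySem.Set.contains (PySem.Set.ofList (tags.map (fun tag => PySem.Str.lower tag))) "editing") <;>
  cases hc3 : (p == "inpainting" || PySem.Set.contains (PySem.Set.ofList (tags.map (fun tag => PySem.Str.lower tag))) "inpainting" || PySem.Set.contains (PySem.Set.ofList (tags.map (fun tag => PySem.Str.lower tag))) "inpaint") <;>
  simp
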